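-- pv_equiv track=rewrite | github.com/RajeshMishra95/CircuitSimulation | qubit_setup.py | generate_x_ancillas
-- ===== SOURCE A (Python) =====
-- def generate_x_ancillas(distance, total_qubits):
--     x_ancillas = []
--     for i in range(1,distance):
--         x_ancillas.append(2*i)
--     for j in x_ancillas:
--         if j + 4*distance - 2 < total_qubits:
--             x_ancillas.append(j + 4*distance -2)
--     return x_ancillas
-- ===== SOURCE B (Python) =====
-- def generate_x_ancillas(distance, total_qubits):
--     if distance < 2:
--         return []
--     off = 4 * distance - 2
--     bases = [2 * i for i in range(1, distance)]
--     result = list(bases)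
--     k = 1
--     while 2 + k * off < total_qubits:
--         result.extend(b + k * off for b in bases if b + k * off < total_qubits)
--         k += 1
--     return result
-- ===== Notes on version B (the rewrite author's own statement) =====
-- stated objective: alternative
-- what changed: Replaces A's iteration over a list that is being appended to (implicit BFS queue) by explicit level-by-level nested loops: bases first, then for k = 1,2,... append the surviving bases shifted by k*(4*distance-2) while the smallest shifted base still fits.
import Mathlib
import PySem

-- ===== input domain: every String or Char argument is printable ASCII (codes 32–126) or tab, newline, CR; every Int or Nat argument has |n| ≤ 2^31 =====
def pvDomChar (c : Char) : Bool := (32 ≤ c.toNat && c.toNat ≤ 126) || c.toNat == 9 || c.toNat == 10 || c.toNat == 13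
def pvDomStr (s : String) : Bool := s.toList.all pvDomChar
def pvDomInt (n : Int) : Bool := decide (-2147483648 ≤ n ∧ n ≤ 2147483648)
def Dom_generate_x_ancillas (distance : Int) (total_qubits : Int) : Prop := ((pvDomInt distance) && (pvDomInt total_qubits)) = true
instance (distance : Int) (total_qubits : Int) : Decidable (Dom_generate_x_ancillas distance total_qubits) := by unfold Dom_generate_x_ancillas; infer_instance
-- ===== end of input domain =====

-- B replaces A's single loop over a list being appended to (an implicit BFS queue)
-- by explicit level-by-level nested loops over the fixed base list (objective: alternative).

-- ===== PORT A =====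
-- Python's 'for j in x_ancillas' iterates over a list that the body appends to; the
-- faithful transcription is a queue recursion: 'pending' is the not-yet-scanned suffix,
-- 'acc' the scanned prefix; the final list is exactly acc when pending runs out.
-- The Nat fuel is a totality guard only: generate_x_ancillas passes measA T pending,
-- which the proofs show never runs out (each step shrinks measA while using one fuel).
def measA (T : Int) (pending : List Int) : Nat :=
  2 * (pending.map (fun e => (T - e).toNat)).sum + pending.length

def goA (off T : Int) : Nat → List Int → List Int → List Int
  | 0, _, acc => acc
  | _ + 1, [], acc => acc
  | fuel + 1, j :: rest, acc =>
    if j + off < T then goA off T fuel (rest ++ [j + off]) (acc ++ [j])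
    else goA off T fuel rest (acc ++ [j])

def generate_x_ancillas (distance : Int) (total_qubits : Int) : List Int :=
  let x_ancillas := (PySem.List.pyRange 1 distance 1).foldl (fun acc i => acc ++ [2 * i]) []
  goA (4 * distance - 2) total_qubits (measA total_qubits x_ancillas) x_ancillas []

-- ===== PORT B =====
-- B: bases first, then explicit levels k = 1, 2, ... while the smallest shifted base
-- (2 + k*off) still fits; level k is every base b with b + k*off < T, shifted by k*off.
-- The Nat fuel is a totality guard for the while loop: each iteration shrinks
-- T - 2 - k*off by off ≥ 1, so the fuel passed below never runs out.
def lvlsB (bases : List Int) (off T : Int) : Nat → Int → List Int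
  | 0, _ => []
  | fuel + 1, k =>
    if 2 + k * off < T then
      (bases.filter (fun b => decide (b + k * off < T))).map (fun b => b + k * off)
        ++ lvlsB bases off T fuel (k + 1)
    else []

def generate_x_ancillas_alt (distance : Int) (total_qubits : Int) : List Int :=
  if distance < 2 then []
  else
    let bases := (PySem.List.pyRange 1 distance 1).map (fun i => 2 * i)
    bases ++ lvlsB bases (4 * distance - 2) total_qubits
      ((total_qubits - 2 - (4 * distance - 2)).toNat + 1) 1

-- ===== PRECONDITION & SPEC =====
def Spec_generate_x_ancillas (distance : Int) (total_qubits : Int) (out : List Int) : Prop := out = generate_x_ancillas_alt distance total_qubits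
instance (distance : Int) (total_qubits : Int) (out : List Int) : Decidable (Spec_generate_x_ancillas distance total_qubits out) := by unfold Spec_generate_x_ancillas; infer_instance

-- ===== CLAIM (what is proved, stated in full; the proofs are below) =====
def Claim_equal_generate_x_ancillas : Prop := ∀ (distance : Int) (total_qubits : Int), Dom_generate_x_ancillas distance total_qubits → Spec_generate_x_ancillas distance total_qubits (generate_x_ancillas distance total_qubits)

-- ===== LEMMAS AND PROOFS =====

-- expandE: the elements A's scan appends while consuming a block p of the queue.
def expandE (off T : Int) (p : List Int) : List Int :=
  p.filterMap (fun j => if j + off < T then some (j + off) else none)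

-- level k as a plain list (the body of lvlsB's nonempty branch).
def levelL (bases : List Int) (off T k : Int) : List Int :=
  (bases.filter (fun b => decide (b + k * off < T))).map (fun b => b + k * off)

-- goA with its canonical (always sufficient) fuel.
def G (off T : Int) (p acc : List Int) : List Int := goA off T (measA T p) p acc

theorem goA_nil_any (off T : Int) (n : Nat) (acc : List Int) :
    goA off T n [] acc = acc := by
  cases n <;> rfl

theorem goA_fuel_eq (off T : Int) (hoff : 0 < off) :
    ∀ n m (p acc : List Int), measA T p ≤ n → measA T p ≤ m →
      goA off T n p acc = goA off T m p acc := by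
  intro n
  induction n using Nat.strong_induction_on with
  | _ n ih =>
    intro m p acc hn hm
    match p with
    | [] => rw [goA_nil_any, goA_nil_any]
    | j :: rest =>
      have h1 : 1 ≤ measA T (j :: rest) := by
        simp only [measA, List.map_cons, List.sum_cons, List.length_cons]; omega
      obtain ⟨n', rfl⟩ : ∃ n', n = n' + 1 := ⟨n - 1, by omega⟩
      obtain ⟨m', rfl⟩ : ∃ m', m = m' + 1 := ⟨m - 1, by omega⟩
      show (if j + off < T then goA off T n' (rest ++ [j + off]) (acc ++ [j])
            else goA off T n' rest (acc ++ [j]))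
          = (if j + off < T then goA off T m' (rest ++ [j + off]) (acc ++ [j])
            else goA off T m' rest (acc ++ [j]))
      by_cases hc : j + off < T
      · rw [if_pos hc, if_pos hc]
        have e1 : measA T (rest ++ [j + off]) + 2 ≤ measA T (j :: rest) := by
          simp only [measA, List.map_append, List.sum_append, List.map_cons, List.sum_cons,
            List.map_nil, List.sum_nil, List.length_append, List.length_cons, List.length_nil]
          omega
        exact ih n' (by omega) m' _ _ (by omega) (by omega)
      · rw [if_neg hc, if_neg hc]
        have e1 : measA T rest + 1 ≤ measA T (j :: rest) := by
          simp only [measA, List.map_cons, List.sum_cons, List.length_cons]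
          omega
        exact ih n' (by omega) m' _ _ (by omega) (by omega)

theorem G_nil (off T : Int) (acc : List Int) : G off T [] acc = acc := by
  unfold G
  rw [goA_nil_any]

theorem G_cons (off T : Int) (hoff : 0 < off) (j : Int) (rest acc : List Int) :
    G off T (j :: rest) acc =
      if j + off < T then G off T (rest ++ [j + off]) (acc ++ [j])
      else G off T rest (acc ++ [j]) := by
  have h1 : 1 ≤ measA T (j :: rest) := by
    simp only [measA, List.map_cons, List.sum_cons, List.length_cons]; omega
  obtain ⟨n', hn⟩ : ∃ n', measA T (j :: rest) = n' + 1 := ⟨measA T (j :: rest) - 1, by omega⟩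
  unfold G
  rw [hn]
  show (if j + off < T then goA off T n' (rest ++ [j + off]) (acc ++ [j])
        else goA off T n' rest (acc ++ [j])) = _
  by_cases hc : j + off < T
  · rw [if_pos hc, if_pos hc]
    have e1 : measA T (rest ++ [j + off]) + 2 ≤ measA T (j :: rest) := by
      simp only [measA, List.map_append, List.sum_append, List.map_cons, List.sum_cons,
        List.map_nil, List.sum_nil, List.length_append, List.length_cons, List.length_nil]
      omega
    exact goA_fuel_eq off T hoff n' _ _ _ (by omega) (le_refl _)
  · rw [if_neg hc, if_neg hc]
    have e1 : measA T rest + 1 ≤ measA T (j :: rest) := by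
      simp only [measA, List.map_cons, List.sum_cons, List.length_cons]
      omega
    exact goA_fuel_eq off T hoff n' _ _ _ (by omega) (le_refl _)

theorem G_append (off T : Int) (hoff : 0 < off) (p : List Int) :
    ∀ q acc, G off T (p ++ q) acc = G off T (q ++ expandE off T p) (acc ++ p) := by
  induction p with
  | nil => intro q acc; simp [expandE]
  | cons j p' ih =>
    intro q acc
    rw [List.cons_append, G_cons off T hoff]
    by_cases hc : j + off < T
    · rw [if_pos hc, List.append_assoc, ih (q ++ [j + off]) (acc ++ [j])]
      simp [expandE, hc]
    · rw [if_neg hc, ih q (acc ++ [j])]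
      simp [expandE, hc]

theorem expandE_level (bases : List Int) (off T k : Int) (hoff : 0 < off) :
    expandE off T (levelL bases off T k) = levelL bases off T (k + 1) := by
  have hko : (k + 1) * off = k * off + off := by ring
  induction bases with
  | nil => simp [expandE, levelL]
  | cons b bs ih =>
    simp only [levelL, List.filter_cons] at *
    by_cases h1 : b + k * off < T
    · simp only [decide_eq_true h1, if_true, List.map_cons]
      by_cases h2 : b + (k + 1) * off < T
      · have h2' : (b + k * off) + off < T := by omega
        simp only [expandE, List.filterMap_cons, if_pos h2', decide_eq_true h2, if_true,
          List.map_cons] at *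
        refine List.cons_eq_cons.mpr ⟨by omega, ih⟩
      · have h2' : ¬ ((b + k * off) + off < T) := by omega
        simp only [expandE, List.filterMap_cons, if_neg h2',
          decide_eq_false h2, Bool.false_eq_true, if_false] at *
        exact ih
    · have h2 : ¬ (b + (k + 1) * off < T) := by omega
      simp only [decide_eq_false h1, decide_eq_false h2, Bool.false_eq_true, if_false] at *
      exact ih

theorem level_eq_nil (bases : List Int) (off T k : Int)
    (hge : ∀ b ∈ bases, 2 ≤ b) (h : ¬ (2 + k * off < T)) :
    levelL bases off T k = [] := by
  unfold levelL
  have : bases.filter (fun b => decide (b + k * off < T)) = [] := by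
    refine List.filter_eq_nil_iff.mpr ?_
    intro b hb
    have := hge b hb
    simp only [decide_eq_true_eq]
    omega
  rw [this, List.map_nil]

theorem G_level (bases : List Int) (off T : Int) (hoff : 0 < off)
    (hge : ∀ b ∈ bases, 2 ≤ b) :
    ∀ (n : Nat) (k : Int) (acc : List Int), (T - 2 - k * off).toNat < n →
      G off T (levelL bases off T k) acc = acc ++ lvlsB bases off T n k := by
  intro n
  induction n with
  | zero => intro k acc h; omega
  | succ m ih =>
    intro k acc h
    by_cases hc : 2 + k * off < T
    · rw [show lvlsB bases off T (m + 1) k =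
          levelL bases off T k ++ lvlsB bases off T m (k + 1) from by
        rw [lvlsB, if_pos hc]; rfl]
      have h1 := G_append off T hoff (levelL bases off T k) [] acc
      simp only [List.append_nil, List.nil_append] at h1
      rw [h1, expandE_level bases off T k hoff]
      have hko : (k + 1) * off = k * off + off := by ring
      rw [ih (k + 1) (acc ++ levelL bases off T k) (by omega)]
      simp [List.append_assoc]
    · rw [show lvlsB bases off T (m + 1) k = [] from by rw [lvlsB, if_neg hc]]
      rw [level_eq_nil bases off T k hge hc, G_nil]
      simp

theorem foldl_app2 (l : List Int) : ∀ acc : List Int,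
    l.foldl (fun a i => a ++ [2 * i]) acc = acc ++ l.map (fun i => 2 * i) := by
  induction l with
  | nil => intro acc; simp
  | cons x xs ih => intro acc; simp [ih]

theorem expandE_eq_level_one (off T : Int) (p : List Int) :
    expandE off T p = levelL p off T 1 := by
  induction p with
  | nil => simp [expandE, levelL]
  | cons b bs ih =>
    simp only [expandE, levelL, List.filterMap_cons, List.filter_cons] at *
    by_cases h : b + off < T
    · have h1 : b + 1 * off < T := by omega
      simp only [if_pos h, decide_eq_true h1, if_true, List.map_cons]
      refine List.cons_eq_cons.mpr ⟨by ring, ih⟩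
    · have h1 : ¬ (b + 1 * off < T) := by omega
      simp only [if_neg h, decide_eq_false h1, Bool.false_eq_true, if_false]
      exact ih

-- ===== VERDICT (by name: the statement is the Claim_ definition above) =====
theorem generate_x_ancillas_spec : Claim_equal_generate_x_ancillas := by
  intro d T _
  show generate_x_ancillas d T = generate_x_ancillas_alt d T
  unfold generate_x_ancillas generate_x_ancillas_alt
  by_cases hd : d < 2
  · have hr : PySem.List.pyRange 1 d 1 = [] := PySem.List.pyRange_one_eq_nil (by omega)
    rw [if_pos hd, hr]
    simp only [List.foldl_nil]
    exact goA_nil_any _ _ _ _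
  · have hoff : (0:Int) < 4 * d - 2 := by omega
    rw [if_neg hd, foldl_app2]
    simp only [List.nil_append]
    have hge : ∀ b ∈ (PySem.List.pyRange 1 d 1).map (fun i => 2 * i), 2 ≤ b := by
      intro b hbm
      obtain ⟨i, hi, rfl⟩ := List.mem_map.mp hbm
      have := (PySem.List.mem_pyRange_one.mp hi).1
      omega
    have h1 := G_append (4 * d - 2) T hoff ((PySem.List.pyRange 1 d 1).map (fun i => 2 * i)) [] []
    simp only [List.append_nil, List.nil_append] at h1
    rw [expandE_eq_level_one] at h1
    have h2 := G_level ((PySem.List.pyRange 1 d 1).map (fun i => 2 * i)) (4 * d - 2) T hoff hge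
      ((T - 2 - (4 * d - 2)).toNat + 1) 1 ((PySem.List.pyRange 1 d 1).map (fun i => 2 * i))
      (by have h3 : (1:Int) * (4 * d - 2) = 4 * d - 2 := one_mul _; omega)
    show G (4 * d - 2) T ((PySem.List.pyRange 1 d 1).map (fun i => 2 * i)) [] = _
    rw [h1, h2]
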